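-- pv_equiv track=rewrite | github.com/AlyssaWendt/Algos | Code Challenges/Challenge 5/monkey.py | monkey_jump
-- ===== SOURCE A (Python) =====
-- def monkey_jump(jumps):
--     total = 0
--     lowest = 0
--     for jump in jumps:
--         total += jump
--         if total < lowest:
--             lowest = total
--     return 1 - lowest
-- ===== SOURCE B (Python) =====
-- def monkey_jump(jumps):
--     # Backward scan: m = minimum prefix sum of the remaining suffix
--     # (including the empty prefix), via m -> min(0, j + m).
--     m = 0
--     for j in reversed(jumps):
--         m = min(0, j + m)
--     return 1 - m
-- ===== Notes on version B (the rewrite author's own statement) =====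
-- stated objective: alternative
-- what changed: Replaces A's forward running-sum scan with two tracked variables by a single backward fold maintaining the minimum prefix sum of the suffix via m = min(0, j + m).
import Mathlib
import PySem

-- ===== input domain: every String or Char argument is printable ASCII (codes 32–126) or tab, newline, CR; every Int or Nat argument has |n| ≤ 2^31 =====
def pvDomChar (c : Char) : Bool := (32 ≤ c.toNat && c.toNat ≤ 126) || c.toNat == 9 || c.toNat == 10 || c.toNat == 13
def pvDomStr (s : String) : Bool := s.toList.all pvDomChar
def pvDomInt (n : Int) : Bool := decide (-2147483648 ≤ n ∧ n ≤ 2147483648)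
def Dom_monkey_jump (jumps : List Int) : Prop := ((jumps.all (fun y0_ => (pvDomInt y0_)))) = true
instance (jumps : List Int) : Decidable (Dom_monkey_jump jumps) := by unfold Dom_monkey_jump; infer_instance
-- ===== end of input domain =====

-- B replaces A's forward running-sum/lowest scan by a backward fold on the suffix
-- minimum prefix sum (alternative decomposition, same O(n) cost).


-- ===== PORT A =====
-- forward scan over (total, lowest)
def monkey_jump (jumps : List Int) : Int :=
  let st := jumps.foldl (fun (p : Int × Int) jump =>
    let total := p.1 + jump
    (total, if total < p.2 then total else p.2)) (0, 0)
  1 - st.2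

-- ===== PORT B =====
-- backward fold: minimum prefix sum of the suffix via m ↦ min 0 (j + m)
def monkey_jump_alt (jumps : List Int) : Int :=
  1 - jumps.foldr (fun j m => min 0 (j + m)) 0

-- ===== PRECONDITION & SPEC =====
def Spec_monkey_jump (jumps : List Int) (out : Int) : Prop := out = monkey_jump_alt jumps
instance (jumps : List Int) (out : Int) : Decidable (Spec_monkey_jump jumps out) := by unfold Spec_monkey_jump; infer_instance

-- ===== CLAIM (what is proved, stated in full; the proofs are below) =====
def Claim_equal_monkey_jump : Prop := ∀ (jumps : List Int), Dom_monkey_jump jumps → Spec_monkey_jump jumps (monkey_jump jumps)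

-- ===== LEMMAS AND PROOFS =====

def pvM (jumps : List Int) : Int := jumps.foldr (fun j m => min 0 (j + m)) 0

theorem pvM_nonpos (jumps : List Int) : pvM jumps ≤ 0 := by
  cases jumps with
  | nil => simp [pvM]
  | cons j rest => simp [pvM]

theorem pv_fold_lowest (jumps : List Int) :
    ∀ (t l : Int), l ≤ t →
      (jumps.foldl (fun (p : Int × Int) jump =>
        (p.1 + jump, if p.1 + jump < p.2 then p.1 + jump else p.2)) (t, l)).2
      = min l (t + pvM jumps) := by
  induction jumps with
  | nil => intro t l h; simp [pvM]; omega
  | cons j rest ih =>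
    intro t l h
    have hM : pvM rest ≤ 0 := pvM_nonpos rest
    have h' : min l (t + j) ≤ t + j := min_le_right _ _
    have := ih (t + j) (min l (t + j)) h'
    simp only [List.foldl_cons, pvM, List.foldr_cons] at this ⊢
    rw [show (if t + j < l then t + j else l) = min l (t + j) by omega, this]
    have : pvM rest = rest.foldr (fun j m => min 0 (j + m)) 0 := rfl
    rw [← this]
    omega

-- ===== VERDICT (by name: the statement is the Claim_ definition above) =====
theorem monkey_jump_spec : Claim_equal_monkey_jump := by
  intro jumps _
  unfold Spec_monkey_jump monkey_jump monkey_jump_alt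
  have := pv_fold_lowest jumps 0 0 le_rfl
  simp only [pvM] at this
  simp only [this]
  have hM : (0 : Int) + jumps.foldr (fun j m => min 0 (j + m)) 0
      = jumps.foldr (fun j m => min 0 (j + m)) 0 := by ring
  have := pvM_nonpos jumps
  simp only [pvM] at this
  omega
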